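-- pv_equiv track=rewrite | github.com/milindhvijay/Advent-of-Code | 2024/Day13/part1.py | find_min_tokens
-- ===== SOURCE A (Python) =====
-- def find_min_tokens(a1, a2, b1, b2, px, py):
--     min_cost = None
--     for a in range(0, 101):
--         rem_x = px - a * a1
--         rem_y = py - a * a2
--         if rem_x < 0 or rem_y < 0:
--             continue
--         if b1 == 0:
--             if rem_x != 0:
--                 continue
--             possible_b_x = set(range(0, 101))
--         else:
--             if rem_x % b1 != 0:
--                 continue
--             b_x = rem_x // b1
--             if not (0 <= b_x <= 100):
--                 continue
--             possible_b_x = {b_x}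
--         if b2 == 0:
--             if rem_y != 0:
--                 continue
--             possible_b_y = set(range(0, 101))
--         else:
--             if rem_y % b2 != 0:
--                 continue
--             b_y = rem_y // b2
--             if not (0 <= b_y <= 100):
--                 continue
--             possible_b_y = {b_y}
--         possible_b = possible_b_x & possible_b_y
--         if possible_b:
--             b = possible_b.pop()
--             cost = a * 3 + b * 1
--             if min_cost is None or cost < min_cost:
--                 min_cost = cost
--     return min_cost
-- ===== SOURCE B (Python) =====
-- def find_min_tokens(a1, a2, b1, b2, px, py):
--     best = None
--     for a in range(101):
--         rem_x = px - a * a1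
--         rem_y = py - a * a2
--         if rem_x < 0 or rem_y < 0:
--             continue
--         for b in range(101):
--             if b * b1 == rem_x and b * b2 == rem_y:
--                 cost = 3 * a + b
--                 if best is None or cost < best:
--                     best = cost
--                 break
--     return best
-- ===== Notes on version B (the rewrite author's own statement) =====
-- stated objective: simpler
-- what changed: Replaces A's per-a modulus/floor-division case analysis with Python-set construction, intersection and pop by a plain nested exhaustive search: for each a in 0..100 scan b in 0..100 for the first pair solving both equations and track the minimum of 3*a+b.
import Mathlib
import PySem

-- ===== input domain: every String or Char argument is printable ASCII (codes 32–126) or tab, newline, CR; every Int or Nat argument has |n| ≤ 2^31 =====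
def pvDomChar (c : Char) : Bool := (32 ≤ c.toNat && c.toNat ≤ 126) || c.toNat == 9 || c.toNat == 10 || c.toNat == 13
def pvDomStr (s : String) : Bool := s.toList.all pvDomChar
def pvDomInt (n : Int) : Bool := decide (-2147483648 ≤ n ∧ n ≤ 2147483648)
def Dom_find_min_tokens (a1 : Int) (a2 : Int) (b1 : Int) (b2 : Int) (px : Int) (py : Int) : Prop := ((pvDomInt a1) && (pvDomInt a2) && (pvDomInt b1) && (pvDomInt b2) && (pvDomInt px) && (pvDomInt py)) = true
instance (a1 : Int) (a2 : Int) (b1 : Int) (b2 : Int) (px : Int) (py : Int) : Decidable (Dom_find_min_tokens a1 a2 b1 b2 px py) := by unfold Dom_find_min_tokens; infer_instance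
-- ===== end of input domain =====

-- B replaces A's per-a division/modulus case analysis and set intersection by a plain
-- nested exhaustive search over both unknowns (objective: simpler).

-- ===== PORT A =====
-- A's Python sets here only ever hold small ints 0..100, whose CPython iteration order is
-- ascending; so set(range(0,101)) / {b} are ported as the ascending lists, '&' as a filter
-- (exact: same elements) and '.pop()' as taking the head (exact: CPython pops the smallest
-- slot, which for these sets is the least element).
def fmtStepA (a1 : Int) (a2 : Int) (b1 : Int) (b2 : Int) (px : Int) (py : Int)
    (min_cost : Option Int) (a : Int) : Option Int :=
  let rem_x := px - a * a1
  let rem_y := py - a * a2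
  if rem_x < 0 ∨ rem_y < 0 then min_cost else
  let possible_b_x? : Option (List Int) :=
    if b1 = 0 then
      (if rem_x ≠ 0 then none else some (PySem.List.pyRange 0 101 1))
    else if PySem.Int.mod rem_x b1 ≠ 0 then none
    else
      let b_x := PySem.Int.floordiv rem_x b1
      if ¬ (0 ≤ b_x ∧ b_x ≤ 100) then none else some [b_x]
  match possible_b_x? with
  | none => min_cost
  | some possible_b_x =>
    let possible_b_y? : Option (List Int) :=
      if b2 = 0 then
        (if rem_y ≠ 0 then none else some (PySem.List.pyRange 0 101 1))
      else if PySem.Int.mod rem_y b2 ≠ 0 then none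
      else
        let b_y := PySem.Int.floordiv rem_y b2
        if ¬ (0 ≤ b_y ∧ b_y ≤ 100) then none else some [b_y]
    match possible_b_y? with
    | none => min_cost
    | some possible_b_y =>
      let possible_b := possible_b_x.filter (fun x => possible_b_y.contains x)
      match possible_b with
      | [] => min_cost
      | b :: _ =>
        let cost := a * 3 + b * 1
        match min_cost with
        | none => some cost
        | some m => if cost < m then some cost else some m

def find_min_tokens (a1 : Int) (a2 : Int) (b1 : Int) (b2 : Int) (px : Int) (py : Int) : Option Int :=
  (PySem.List.pyRange 0 101 1).foldl (fmtStepA a1 a2 b1 b2 px py) none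

-- ===== PORT B =====
-- inner 'for b in range(101): if …: update; break' as structural recursion on the b-list
def fmtInnerB (b1 : Int) (b2 : Int) (rem_x : Int) (rem_y : Int) (a : Int)
    (best : Option Int) : List Int → Option Int
  | [] => best
  | b :: bs =>
    if b * b1 == rem_x && b * b2 == rem_y then
      let cost := 3 * a + b
      match best with
      | none => some cost
      | some m => if cost < m then some cost else some m
    else fmtInnerB b1 b2 rem_x rem_y a best bs

def fmtStepB (a1 : Int) (a2 : Int) (b1 : Int) (b2 : Int) (px : Int) (py : Int)
    (best : Option Int) (a : Int) : Option Int :=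
  let rem_x := px - a * a1
  let rem_y := py - a * a2
  if rem_x < 0 ∨ rem_y < 0 then best
  else fmtInnerB b1 b2 rem_x rem_y a best (PySem.List.pyRange 0 101 1)

def find_min_tokens_alt (a1 : Int) (a2 : Int) (b1 : Int) (b2 : Int) (px : Int) (py : Int) : Option Int :=
  (PySem.List.pyRange 0 101 1).foldl (fmtStepB a1 a2 b1 b2 px py) none

-- ===== PRECONDITION & SPEC =====
def Spec_find_min_tokens (a1 : Int) (a2 : Int) (b1 : Int) (b2 : Int) (px : Int) (py : Int) (out : Option Int) : Prop := out = find_min_tokens_alt a1 a2 b1 b2 px py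
instance (a1 : Int) (a2 : Int) (b1 : Int) (b2 : Int) (px : Int) (py : Int) (out : Option Int) : Decidable (Spec_find_min_tokens a1 a2 b1 b2 px py out) := by unfold Spec_find_min_tokens; infer_instance

-- ===== CLAIM (what is proved, stated in full; the proofs are below) =====
def Claim_equal_find_min_tokens : Prop := ∀ (a1 : Int) (a2 : Int) (b1 : Int) (b2 : Int) (px : Int) (py : Int), Dom_find_min_tokens a1 a2 b1 b2 px py → Spec_find_min_tokens a1 a2 b1 b2 px py (find_min_tokens a1 a2 b1 b2 px py)

-- ===== LEMMAS AND PROOFS =====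

-- b * c = d, for c ≠ 0, means exactly: c divides d (floor-mod 0) and b is the floor quotient
theorem fmt_solve (c d b : Int) (hc : c ≠ 0) :
    b * c = d ↔ (PySem.Int.mod d c = 0 ∧ b = PySem.Int.floordiv d c) := by
  constructor
  · rintro rfl
    have hmod : PySem.Int.mod (b * c) c = 0 :=
      (PySem.Int.mod_eq_zero_iff_dvd _ _).mpr ⟨b, mul_comm b c⟩
    refine ⟨hmod, ?_⟩
    have h := PySem.Int.floordiv_mul_add_mod (b * c) c
    rw [hmod, add_zero] at h
    exact (mul_right_cancel₀ hc h).symm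
  · rintro ⟨hmod, rfl⟩
    have h := PySem.Int.floordiv_mul_add_mod d c
    rw [hmod, add_zero] at h
    exact h

-- find? on a list finds the unique satisfying element
theorem fmt_find?_unique {p : Int → Bool} {l : List Int} {b0 : Int}
    (hmem : b0 ∈ l) (hp : p b0 = true) (huni : ∀ x, p x = true → x = b0) :
    l.find? p = some b0 := by
  induction l with
  | nil => cases hmem
  | cons a t ih =>
    by_cases ha : p a = true
    · have := huni a ha; subst this; simp [List.find?, ha]
    · have hbt : b0 ∈ t := by
        rcases List.mem_cons.mp hmem with h | h
        · exact absurd (h ▸ hp) ha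
        · exact h
      simp only [List.find?, Bool.not_eq_true] at ha ⊢
      rw [ha]
      exact ih hbt

-- filtering a nodup list down to one of its elements gives the singleton
theorem fmt_filter_eq_c {l : List Int} {c : Int} (hmem : c ∈ l) (hn : l.Nodup) :
    l.filter (fun x => x == c) = [c] := by
  induction l with
  | nil => cases hmem
  | cons x t ih =>
    rcases List.nodup_cons.mp hn with ⟨hx, hnt⟩
    rcases List.mem_cons.mp hmem with h | h
    · subst h
      have h0 : t.filter (fun y => y == c) = [] :=
        List.filter_eq_nil_iff.mpr (fun y hy => by
          simp only [beq_iff_eq]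
          rintro rfl; exact hx hy)
      simp [h0]
    · have hxc : (x == c) = false := by
        simp only [beq_eq_false_iff_ne]; rintro rfl; exact hx h
      simp [hxc, ih h hnt]

theorem fmt_filter_singleton {l : List Int} {c : Int} (hmem : c ∈ l) (hn : l.Nodup) :
    l.filter (fun x => [c].contains x) = [c] := by
  have h : (fun x : Int => [c].contains x) = (fun x : Int => x == c) := by
    funext x
    simp only [List.contains_cons, List.contains_nil, Bool.or_false]
  rw [h]; exact fmt_filter_eq_c hmem hn

-- B's inner break-loop is find? followed by the update
theorem fmt_innerB_eq_find? (b1 b2 rem_x rem_y a : Int) (best : Option Int) (l : List Int) :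
    fmtInnerB b1 b2 rem_x rem_y a best l =
      match l.find? (fun b => b * b1 == rem_x && b * b2 == rem_y) with
      | none => best
      | some b =>
        match best with
        | none => some (3 * a + b)
        | some m => if 3 * a + b < m then some (3 * a + b) else some m := by
  induction l with
  | nil => simp [fmtInnerB]
  | cons b bs ih =>
    by_cases hb : ((b * b1 == rem_x && b * b2 == rem_y) : Bool) = true
    · simp [fmtInnerB, List.find?, hb]
    · simp only [Bool.not_eq_true] at hb
      simp [fmtInnerB, List.find?, hb, ih]

-- the two styles of writing the cost update agree
theorem fmt_upd (acc : Option Int) (a b : Int) :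
    (match acc with
      | none => some (a * 3 + b * 1)
      | some m => if a * 3 + b * 1 < m then some (a * 3 + b * 1) else some m) =
    (match acc with
      | none => some (3 * a + b)
      | some m => if 3 * a + b < m then some (3 * a + b) else some m) := by
  have h : a * 3 + b * 1 = 3 * a + b := by ring
  rw [h]

theorem fmt_step_eq (a1 a2 b1 b2 px py : Int) (acc : Option Int) (a : Int) :
    fmtStepA a1 a2 b1 b2 px py acc a = fmtStepB a1 a2 b1 b2 px py acc a := by
  unfold fmtStepA fmtStepB
  dsimp only []
  by_cases hg : px - a * a1 < 0 ∨ py - a * a2 < 0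
  · simp only [if_pos hg]
  simp only [if_neg hg]
  rw [fmt_innerB_eq_find?]
  set rx := px - a * a1 with hrxdef
  set ry := py - a * a2 with hrydef
  by_cases hb1 : b1 = 0
  · subst hb1
    by_cases hrx0 : rx = 0
    · by_cases hb2 : b2 = 0
      · subst hb2
        by_cases hry0 : ry = 0
        · -- both degenerate: both sides pick b = 0
          have hcons : PySem.List.pyRange 0 101 1 = 0 :: PySem.List.pyRange 1 101 1 :=
            PySem.List.pyRange_one_cons (by norm_num)
          have hf : (PySem.List.pyRange 0 101 1).find? (fun b => b * 0 == rx && b * 0 == ry) = some 0 := by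
            rw [hcons]; simp [List.find?, hrx0, hry0]
          have hfil : (PySem.List.pyRange 0 101 1).filter
              (fun x => (PySem.List.pyRange 0 101 1).contains x) = PySem.List.pyRange 0 101 1 :=
            List.filter_eq_self.mpr (fun x hx => by simpa using hx)
          rw [hf]
          simp only [hrx0, hry0, ne_eq, not_true_eq_false, if_false, ite_true]
          simp only [hcons]
          exact fmt_upd acc a 0
        · -- ry ≠ 0 with b2 = 0: no solution on either side
          have hf : (PySem.List.pyRange 0 101 1).find? (fun b => b * 0 == rx && b * 0 == ry) = none :=
            List.find?_eq_none.mpr (fun x _ => by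
              simp only [Bool.and_eq_true, beq_iff_eq, mul_zero, not_and]
              intro _ h; exact hry0 h.symm)
          rw [hf]; simp [hrx0, hry0]
      · by_cases hmy : PySem.Int.mod ry b2 = 0
        · by_cases hqy : 0 ≤ PySem.Int.floordiv ry b2 ∧ PySem.Int.floordiv ry b2 ≤ 100
          · have hqmem : PySem.Int.floordiv ry b2 ∈ PySem.List.pyRange 0 101 1 :=
              PySem.List.mem_pyRange_one.mpr ⟨hqy.1, by omega⟩
            have hsol : PySem.Int.floordiv ry b2 * b2 = ry := (fmt_solve b2 ry _ hb2).mpr ⟨hmy, rfl⟩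
            have hf : (PySem.List.pyRange 0 101 1).find? (fun b => b * 0 == rx && b * b2 == ry) =
                some (PySem.Int.floordiv ry b2) :=
              fmt_find?_unique hqmem (by simp [hrx0, hsol])
                (fun x hx => by
                  simp only [Bool.and_eq_true, beq_iff_eq, mul_zero] at hx
                  exact ((fmt_solve b2 ry x hb2).mp hx.2).2)
            have hfil : (PySem.List.pyRange 0 101 1).filter
                (fun x => [PySem.Int.floordiv ry b2].contains x) = [PySem.Int.floordiv ry b2] :=
              fmt_filter_singleton hqmem (PySem.List.nodup_pyRange_one 0 101)
            rw [hf]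
            simp only [hrx0, ne_eq, not_true_eq_false, if_false, ite_true, if_neg hb2, if_neg (not_not_intro hmy), if_neg (not_not_intro hqy)]
            simp only [hfil]
            exact fmt_upd acc a _
          · have hf : (PySem.List.pyRange 0 101 1).find? (fun b => b * 0 == rx && b * b2 == ry) = none :=
              List.find?_eq_none.mpr (fun x hx => by
                simp only [Bool.and_eq_true, beq_iff_eq, mul_zero, not_and]
                intro _ h
                have hxq := ((fmt_solve b2 ry x hb2).mp h).2
                have hb := PySem.List.mem_pyRange_one.mp hx
                exact hqy ⟨by omega, by omega⟩)
            rw [hf]; simp [hrx0, hb2, hmy, hqy]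
        · have hf : (PySem.List.pyRange 0 101 1).find? (fun b => b * 0 == rx && b * b2 == ry) = none :=
            List.find?_eq_none.mpr (fun x _ => by
              simp only [Bool.and_eq_true, beq_iff_eq, mul_zero, not_and]
              intro _ h
              exact hmy ((fmt_solve b2 ry x hb2).mp h).1)
          rw [hf]; simp [hrx0, hb2, hmy]
    · -- rx ≠ 0 with b1 = 0: no solution on either side
      have hf : (PySem.List.pyRange 0 101 1).find? (fun b => b * 0 == rx && b * b2 == ry) = none :=
        List.find?_eq_none.mpr (fun x _ => by
          simp only [Bool.and_eq_true, beq_iff_eq, mul_zero, not_and]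
          intro h; exact absurd h.symm hrx0)
      rw [hf]; simp [hrx0]
  · -- b1 ≠ 0
    by_cases hmx : PySem.Int.mod rx b1 = 0
    · by_cases hqx : 0 ≤ PySem.Int.floordiv rx b1 ∧ PySem.Int.floordiv rx b1 ≤ 100
      · have hqmem : PySem.Int.floordiv rx b1 ∈ PySem.List.pyRange 0 101 1 :=
          PySem.List.mem_pyRange_one.mpr ⟨hqx.1, by omega⟩
        have hsolx : PySem.Int.floordiv rx b1 * b1 = rx := (fmt_solve b1 rx _ hb1).mpr ⟨hmx, rfl⟩
        have hcontains : (PySem.List.pyRange 0 101 1).contains (PySem.Int.floordiv rx b1) = true := by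
          simpa using hqmem
        by_cases hb2 : b2 = 0
        · subst hb2
          by_cases hry0 : ry = 0
          · have hf : (PySem.List.pyRange 0 101 1).find? (fun b => b * b1 == rx && b * 0 == ry) =
                some (PySem.Int.floordiv rx b1) :=
              fmt_find?_unique hqmem (by simp [hry0, hsolx])
                (fun x hx => by
                  simp only [Bool.and_eq_true, beq_iff_eq, mul_zero] at hx
                  exact ((fmt_solve b1 rx x hb1).mp hx.1).2)
            rw [hf]
            simp only [hry0, ne_eq, not_true_eq_false, if_false, ite_true, if_neg hb1, if_neg (not_not_intro hmx), if_neg (not_not_intro hqx)]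
            simp only [List.filter_cons, hcontains, if_true, List.filter_nil]
            exact fmt_upd acc a _
          · have hf : (PySem.List.pyRange 0 101 1).find? (fun b => b * b1 == rx && b * 0 == ry) = none :=
              List.find?_eq_none.mpr (fun x _ => by
                simp only [Bool.and_eq_true, beq_iff_eq, mul_zero, not_and]
                intro _ h; exact hry0 h.symm)
            rw [hf]; simp [hb1, hmx, hqx, hry0]
        · by_cases hmy : PySem.Int.mod ry b2 = 0
          · by_cases hqy : 0 ≤ PySem.Int.floordiv ry b2 ∧ PySem.Int.floordiv ry b2 ≤ 100
            · have hsoly : PySem.Int.floordiv ry b2 * b2 = ry := (fmt_solve b2 ry _ hb2).mpr ⟨hmy, rfl⟩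
              by_cases heq : PySem.Int.floordiv rx b1 = PySem.Int.floordiv ry b2
              · have hf : (PySem.List.pyRange 0 101 1).find? (fun b => b * b1 == rx && b * b2 == ry) =
                    some (PySem.Int.floordiv rx b1) :=
                  fmt_find?_unique hqmem (by simp [hsolx, heq ▸ hsoly])
                    (fun x hx => by
                      simp only [Bool.and_eq_true, beq_iff_eq] at hx
                      exact ((fmt_solve b1 rx x hb1).mp hx.1).2)
                rw [hf]
                simp only [ne_eq, if_neg hb1, if_neg hb2, if_neg (not_not_intro hmx), if_neg (not_not_intro hqx), if_neg (not_not_intro hmy), if_neg (not_not_intro hqy)]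
                simp only [List.filter_cons, List.contains_cons, List.contains_nil, heq, beq_self_eq_true, Bool.true_or, if_true, List.filter_nil]
                exact fmt_upd acc a _
              · have hf : (PySem.List.pyRange 0 101 1).find? (fun b => b * b1 == rx && b * b2 == ry) = none :=
                  List.find?_eq_none.mpr (fun x _ => by
                    simp only [Bool.and_eq_true, beq_iff_eq, not_and]
                    intro h1 h2
                    have e1 := ((fmt_solve b1 rx x hb1).mp h1).2
                    have e2 := ((fmt_solve b2 ry x hb2).mp h2).2
                    exact heq (e1 ▸ e2 ▸ rfl))
                rw [hf]
                simp only [ne_eq, if_neg hb1, if_neg hb2, if_neg (not_not_intro hmx), if_neg (not_not_intro hqx), if_neg (not_not_intro hmy), if_neg (not_not_intro hqy)]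
                have hne : ((PySem.Int.floordiv rx b1) == (PySem.Int.floordiv ry b2)) = false := by
                  simpa using heq
                simp [heq]
            · have hf : (PySem.List.pyRange 0 101 1).find? (fun b => b * b1 == rx && b * b2 == ry) = none :=
                List.find?_eq_none.mpr (fun x hx => by
                  simp only [Bool.and_eq_true, beq_iff_eq, not_and]
                  intro _ h
                  have hxq := ((fmt_solve b2 ry x hb2).mp h).2
                  have hb := PySem.List.mem_pyRange_one.mp hx
                  exact hqy ⟨by omega, by omega⟩)
              rw [hf]; simp [hb1, hb2, hmx, hqx, hmy, hqy]
          · have hf : (PySem.List.pyRange 0 101 1).find? (fun b => b * b1 == rx && b * b2 == ry) = none :=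
              List.find?_eq_none.mpr (fun x _ => by
                simp only [Bool.and_eq_true, beq_iff_eq, not_and]
                intro _ h
                exact hmy ((fmt_solve b2 ry x hb2).mp h).1)
            rw [hf]; simp [hb1, hb2, hmx, hqx, hmy]
      · have hf : (PySem.List.pyRange 0 101 1).find? (fun b => b * b1 == rx && b * b2 == ry) = none :=
          List.find?_eq_none.mpr (fun x hx => by
            simp only [Bool.and_eq_true, beq_iff_eq, not_and]
            intro h _
            have hxq := ((fmt_solve b1 rx x hb1).mp h).2
            have hb := PySem.List.mem_pyRange_one.mp hx
            exact hqx ⟨by omega, by omega⟩)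
        rw [hf]; simp [hb1, hmx, hqx]
    · have hf : (PySem.List.pyRange 0 101 1).find? (fun b => b * b1 == rx && b * b2 == ry) = none :=
        List.find?_eq_none.mpr (fun x _ => by
          simp only [Bool.and_eq_true, beq_iff_eq, not_and]
          intro h _
          exact hmx ((fmt_solve b1 rx x hb1).mp h).1)
      rw [hf]; simp [hb1, hmx]

theorem find_min_tokens_spec : Claim_equal_find_min_tokens := by
  intro a1 a2 b1 b2 px py _
  unfold Spec_find_min_tokens find_min_tokens find_min_tokens_alt
  exact PySem.List.foldl_congr_mem _ _ _ _ (fun acc x _ => fmt_step_eq a1 a2 b1 b2 px py acc x)
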